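-- pv_equiv track=rewrite | github.com/AleNardon/Sopa-de-Letras | Compilado/ProgramaEnPy.py | checkRepetidosd1
-- ===== SOURCE A (Python) =====
-- def checkRepetidosd1(tablero,palabra,posv,posh,orientacion):
--     e = True
--     v = posv
--     h = posh
--
--     for letra in palabra:
--         try:                                                    #El try se ejecuta y si da error es por que se va del index de la lista.
--             if tablero[v][h] == letra:                          #Si la letra que estaba en el tablero coincide con la de la palabra.
--
--                 if v>=0 and h>=0:                               #Esta condicion se debe a que al restar puede pasar en negativo y que no de error pero no sea posible la palabra en diagonal.
--                     if orientacion:                             #Se mueve en diagonal sumando 1 en vertical y horizontal si la orientación es True.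
--                         v +=1
--                         h +=1
--                     else:                                       #Se mueve en diagonal restando 1 en vertical y horizontal si la orientación es False.
--                         v -=1
--                         h +=1
--
--                 else:                                           #Caso que la posición sea negativa es por que se salió del rango, por lo tanto no entra.
--                     e = False
--                     break
--
--             else:
--                 e = False                                       #No es válida la palabra en esa posición.
--                 break
--
--         except IndexError:                                      #Si hay un error donde el index de la lista del tablero a excedido su tam, entonces la palabra no es válida.
--             e = False
--             break
--
--     return e                                                    #Devuelve el estado.
-- ===== SOURCE B (Python) =====
-- def checkRepetidosd1(tablero, palabra, posv, posh, orientacion):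
--     # Staged: slice out the rows the diagonal crosses, extract the diagonal
--     # cells, then compare the whole list against the letters of palabra.
--     n = len(palabra)
--     if n == 0:
--         return True
--     if orientacion:
--         if posv < 0 or posv + n > len(tablero):
--             return False
--         rows = tablero[posv:posv + n]
--     else:
--         if posv - n + 1 < 0 or posv >= len(tablero):
--             return False
--         rows = tablero[posv - n + 1:posv + 1][::-1]
--     if posh < 0:
--         return False
--     diag = []
--     for i, row in enumerate(rows):
--         if posh + i >= len(row):
--             return False
--         diag.append(row[posh + i])
--     return diag == list(palabra)
-- ===== Notes on version B (the rewrite author's own statement) =====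
-- stated objective: alternative
-- what changed: B is staged instead of a cursor walk: it slices the n board rows the diagonal crosses (reversing the slice for the downward orientation), rejects out-of-board positions by closed-form bound checks on the slice, extracts the diagonal cells into a list, and finally compares that list wholesale against list(palabra), replacing A's mutable (v,h) cursor with per-letter compare, try/except IndexError and break flags.
import Mathlib
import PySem

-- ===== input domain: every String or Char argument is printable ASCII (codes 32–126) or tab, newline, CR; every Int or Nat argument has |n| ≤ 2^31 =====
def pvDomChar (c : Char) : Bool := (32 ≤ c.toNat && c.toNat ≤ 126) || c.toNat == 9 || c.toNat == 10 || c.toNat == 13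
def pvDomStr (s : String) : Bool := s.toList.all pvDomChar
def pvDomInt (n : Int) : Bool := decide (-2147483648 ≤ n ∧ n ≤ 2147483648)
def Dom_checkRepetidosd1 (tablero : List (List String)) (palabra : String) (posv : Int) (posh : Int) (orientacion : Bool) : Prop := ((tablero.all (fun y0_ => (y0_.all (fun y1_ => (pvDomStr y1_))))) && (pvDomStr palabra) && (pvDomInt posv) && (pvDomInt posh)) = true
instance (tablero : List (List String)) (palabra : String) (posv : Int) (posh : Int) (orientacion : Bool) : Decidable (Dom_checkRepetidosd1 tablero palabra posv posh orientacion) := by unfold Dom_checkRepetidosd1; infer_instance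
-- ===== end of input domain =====

-- B replaces A's cursor walk (mutable (v,h), per-letter compare, try/except
-- IndexError, break flags) by a staged computation: slice out the rows the
-- diagonal crosses (reversed for the downward orientation), reject
-- out-of-board positions by closed-form bound checks, extract the diagonal
-- cells into a list, and compare it wholesale with list(palabra)
-- (objective: alternative, same cost). Both are total.

-- ===== PORT A =====
-- the for-loop over palabra with mutable state (v, h); early `break`s become `false`
def checkRepetidosd1Go (tablero : List (List String)) (orientacion : Bool) :
    List Char → Int → Int → Bool
  | [], _, _ => true
  | letra :: rest, v, h =>
    match PySem.List.pyGet? tablero v with        -- tablero[v]; none = IndexError → caught, e = False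
    | none => false
    | some row =>
      match PySem.List.pyGet? row h with          -- tablero[v][h]
      | none => false
      | some cell =>
        if cell == String.ofList [letra] then
          if 0 ≤ v ∧ 0 ≤ h then
            if orientacion then
              checkRepetidosd1Go tablero orientacion rest (v + 1) (h + 1)
            else
              checkRepetidosd1Go tablero orientacion rest (v - 1) (h + 1)
          else false
        else false

def checkRepetidosd1 (tablero : List (List String)) (palabra : String) (posv : Int) (posh : Int) (orientacion : Bool) : Bool :=
  checkRepetidosd1Go tablero orientacion palabra.toList posv posh

-- ===== PORT B =====
-- the 1-character string a Python `for letra in palabra` iterates with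
def pvSingle (c : Char) : String := String.ofList [c]

-- Source B's extraction loop: `for i, row in enumerate(rows): if posh+i >= len(row): return False; diag.append(row[posh+i])`
def altExtract (posh : Int) : List (List String) → Nat → Option (List String)
  | [], _ => some []
  | row :: rest, i =>
    if (row.length : Int) ≤ posh + (i : Int) then none
    else
      match altExtract posh rest (i + 1) with
      | none => none
      | some ds => some (row.getD (posh + (i : Int)).toNat "" :: ds)

def checkRepetidosd1_alt (tablero : List (List String)) (palabra : String) (posv : Int) (posh : Int) (orientacion : Bool) : Bool :=
  let cs := palabra.toList
  let n : Int := (cs.length : Int)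
  if cs.length = 0 then true
  else
    let rows? : Option (List (List String)) :=
      if orientacion then
        if posv < 0 ∨ (tablero.length : Int) < posv + n then none
        else some (PySem.List.slice tablero (some posv) (some (posv + n)))
      else
        if posv - n + 1 < 0 ∨ (tablero.length : Int) ≤ posv then none
        else some ((PySem.List.slice tablero (some (posv - n + 1)) (some (posv + 1))).reverse)
    match rows? with
    | none => false
    | some rows =>
      if posh < 0 then false
      else
        match altExtract posh rows 0 with
        | none => false
        | some diag => diag == cs.map pvSingle

-- ===== PRECONDITION & SPEC =====
def Spec_checkRepetidosd1 (tablero : List (List String)) (palabra : String) (posv : Int) (posh : Int) (orientacion : Bool) (out : Bool) : Prop := out = checkRepetidosd1_alt tablero palabra posv posh orientacion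
instance (tablero : List (List String)) (palabra : String) (posv : Int) (posh : Int) (orientacion : Bool) (out : Bool) : Decidable (Spec_checkRepetidosd1 tablero palabra posv posh orientacion out) := by unfold Spec_checkRepetidosd1; infer_instance

-- ===== CLAIM (what is proved, stated in full; the proofs are below) =====
def Claim_equal_checkRepetidosd1 : Prop := ∀ (tablero : List (List String)) (palabra : String) (posv : Int) (posh : Int) (orientacion : Bool), Dom_checkRepetidosd1 tablero palabra posv posh orientacion → Spec_checkRepetidosd1 tablero palabra posv posh orientacion (checkRepetidosd1 tablero palabra posv posh orientacion)

-- ===== LEMMAS AND PROOFS =====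

-- one step of the diagonal check at absolute coordinates (v, h)
def pvStep (tablero : List (List String)) (v h : Int) (letra : Char) : Bool :=
  decide (0 ≤ v) && decide (v < (tablero.length : Int)) &&
    (let row := tablero.getD v.toNat []
     decide (0 ≤ h) && decide (h < (row.length : Int)) &&
       (row.getD h.toNat "" == pvSingle letra))

-- A's loop body for one letter equals one pvStep (and controls the tail)
theorem goA_cons (tablero : List (List String)) (orientacion : Bool)
    (letra : Char) (rest : List Char) (v h : Int) :
    checkRepetidosd1Go tablero orientacion (letra :: rest) v h =
      (pvStep tablero v h letra &&
        checkRepetidosd1Go tablero orientacion rest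
          (if orientacion then v + 1 else v - 1) (h + 1)) := by
  by_cases hv : 0 ≤ v
  · by_cases hvl : v < (tablero.length : Int)
    · have hvn : v.toNat < tablero.length := by omega
      have hrow : PySem.List.pyGet? tablero v = some tablero[v.toNat] := by
        have := PySem.List.pyGet?_ofNat tablero v.toNat hvn
        simpa [Int.toNat_of_nonneg hv] using this
      by_cases hh : 0 ≤ h
      · by_cases hhl : h < (tablero[v.toNat].length : Int)
        · have hhn : h.toNat < tablero[v.toNat].length := by omega
          have hcell : PySem.List.pyGet? tablero[v.toNat] h = some tablero[v.toNat][h.toNat] := by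
            have := PySem.List.pyGet?_ofNat tablero[v.toNat] h.toNat hhn
            simpa [Int.toNat_of_nonneg hh] using this
          simp only [checkRepetidosd1Go, hrow, hcell, pvStep,
            List.getD_eq_getElem?_getD, List.getElem?_eq_getElem hvn,
            List.getElem?_eq_getElem hhn, Option.getD_some]
          by_cases hc : tablero[v.toNat][h.toNat] == pvSingle letra <;>
            simp [pvSingle] at hc ⊢ <;>
            simp [hc, hv, hvl, hh, hhl] <;> cases orientacion <;> simp
        · have hcell : PySem.List.pyGet? tablero[v.toNat] h = none := by
            unfold PySem.List.pyGet? PySem.List.pyIdx?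
            rw [if_pos hh, if_neg hhl]
            rfl
          simp [checkRepetidosd1Go, hrow, hcell, pvStep,
            List.getD_eq_getElem?_getD, List.getElem?_eq_getElem hvn, hhl]
      · cases hcell : PySem.List.pyGet? tablero[v.toNat] h with
        | none => simp [checkRepetidosd1Go, hrow, hcell, pvStep, hh]
        | some cell =>
          simp only [checkRepetidosd1Go, hrow, hcell, pvStep]
          by_cases hc : cell == pvSingle letra <;> simp [pvSingle] at hc ⊢ <;> simp [hc, hh]
    · have hrow : PySem.List.pyGet? tablero v = none := by
        unfold PySem.List.pyGet? PySem.List.pyIdx?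
        rw [if_pos hv, if_neg hvl]
        rfl
      simp [checkRepetidosd1Go, hrow, pvStep, hvl]
  · cases hrow : PySem.List.pyGet? tablero v with
    | none => simp [checkRepetidosd1Go, hrow, pvStep, hv]
    | some row =>
      cases hcell : PySem.List.pyGet? row h with
      | none => simp [checkRepetidosd1Go, hrow, hcell, pvStep, hv]
      | some cell =>
        simp only [checkRepetidosd1Go, hrow, hcell, pvStep]
        by_cases hc : cell == pvSingle letra <;> simp [pvSingle] at hc ⊢ <;> simp [hc, hv]

-- A's loop is true iff every diagonal step is true
theorem goA_iff (tablero : List (List String)) (orientacion : Bool) :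
    ∀ (cs : List Char) (v h : Int),
      checkRepetidosd1Go tablero orientacion cs v h = true ↔
        ∀ i : Nat, (hi : i < cs.length) →
          pvStep tablero (v + (if orientacion then (1 : Int) else -1) * i) (h + i) cs[i] = true := by
  intro cs
  induction cs with
  | nil => intro v h; simp [checkRepetidosd1Go]
  | cons c rest ih =>
    intro v h
    rw [goA_cons, Bool.and_eq_true]
    constructor
    · rintro ⟨h0, htail⟩ i hi
      cases i with
      | zero => simpa using h0
      | succ j =>
        have hj : j < rest.length := by simpa using hi
        have := (ih _ _).1 htail j hj
        have harg1 : (if orientacion then v + 1 else v - 1) +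
            (if orientacion then (1 : Int) else -1) * j =
            v + (if orientacion then (1 : Int) else -1) * ((j + 1 : Nat) : Int) := by
          cases orientacion <;> simp <;> omega
        have harg2 : h + 1 + (j : Int) = h + ((j + 1 : Nat) : Int) := by omega
        rw [harg1, harg2] at this
        simpa using this
    · intro hall
      refine ⟨?_, (ih _ _).2 ?_⟩
      · simpa using hall 0 (by simp)
      · intro j hj
        have := hall (j + 1) (by simpa using Nat.succ_lt_succ hj)
        have harg1 : (if orientacion then v + 1 else v - 1) +
            (if orientacion then (1 : Int) else -1) * j =
            v + (if orientacion then (1 : Int) else -1) * ((j + 1 : Nat) : Int) := by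
          cases orientacion <;> simp <;> omega
        have harg2 : h + 1 + (j : Int) = h + ((j + 1 : Nat) : Int) := by omega
        rw [harg1, harg2]
        simpa using this

-- B's extraction-and-compare stage, characterised per index
theorem altExtract_iff (posh : Int) :
    ∀ (rows : List (List String)) (cs : List Char) (i : Nat),
      ((match altExtract posh rows i with
        | none => false
        | some d => d == cs.map pvSingle) = true) ↔
      (rows.length = cs.length ∧ ∀ j : Nat, (hj : j < rows.length) → (hj' : j < cs.length) →
        posh + ((i + j : Nat) : Int) < (rows[j].length : Int) ∧
          rows[j].getD (posh + ((i + j : Nat) : Int)).toNat "" = pvSingle cs[j]) := by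
  intro rows
  induction rows with
  | nil =>
    intro cs i
    cases cs <;> simp [altExtract]
  | cons row rs ih =>
    intro cs i
    by_cases hb : (row.length : Int) ≤ posh + (i : Int)
    · simp only [altExtract, if_pos hb]
      constructor
      · intro h; exact absurd h (by simp)
      · rintro ⟨hlen, hall⟩
        cases cs with
        | nil => simp at hlen
        | cons c cs' =>
          have := (hall 0 (by simp) (by simp)).1
          simp at this
          omega
    · simp only [altExtract, if_neg hb]
      cases hrec : altExtract posh rs (i + 1) with
      | none =>
        constructor
        · intro h; exact absurd h (by simp)
        · rintro ⟨hlen, hall⟩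
          cases cs with
          | nil => simp at hlen
          | cons c cs' =>
            have hlen' : rs.length = cs'.length := by simpa using hlen
            have hfalse : ((match altExtract posh rs (i + 1) with
                | none => false
                | some d => d == cs'.map pvSingle) = true) := by
              rw [ih cs' (i + 1)]
              refine ⟨hlen', ?_⟩
              intro j hj hj'
              have := hall (j + 1) (by simpa using Nat.succ_lt_succ hj)
                (by simpa using Nat.succ_lt_succ hj')
              have hc : ((i + (j + 1) : Nat) : Int) = (((i + 1) + j : Nat) : Int) := by
                push_cast; ring
              rw [hc] at this
              simpa using this
            rw [hrec] at hfalse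
            simp at hfalse
      | some ds =>
        cases cs with
        | nil => simp
        | cons c cs' =>
          have hih := ih cs' (i + 1)
          rw [hrec] at hih
          constructor
          · intro h
            have h' : row.getD (posh + (i : Int)).toNat "" = pvSingle c ∧
                ds = cs'.map pvSingle := by simpa using h
            obtain ⟨h1, h2⟩ := h'
            obtain ⟨hlen', hall'⟩ := hih.1 (by simp [h2])
            refine ⟨by simp [hlen'], ?_⟩
            intro j hj hj'
            cases j with
            | zero =>
              refine ⟨by simpa using (by omega : posh + (i : Int) < (row.length : Int)), ?_⟩
              simpa using h1
            | succ k =>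
              have := hall' k (by simpa using hj) (by simpa using hj')
              have hc : (((i + 1) + k : Nat) : Int) = ((i + (k + 1) : Nat) : Int) := by
                push_cast; ring
              rw [hc] at this
              simpa using this
          · rintro ⟨hlen, hall⟩
            have h1 : row.getD (posh + (i : Int)).toNat "" = pvSingle c := by
              simpa using (hall 0 (by simp) (by simp)).2
            have h2 : (ds == cs'.map pvSingle) = true := by
              rw [hih]
              refine ⟨by simpa using hlen, ?_⟩
              intro j hj hj'
              have := hall (j + 1) (by simpa using Nat.succ_lt_succ hj)
                (by simpa using Nat.succ_lt_succ hj')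
              have hc : ((i + (j + 1) : Nat) : Int) = (((i + 1) + j : Nat) : Int) := by
                push_cast; ring
              rw [hc] at this
              simpa using this
            have h2' : ds = cs'.map pvSingle := by simpa using h2
            simp only [List.getD_eq_getElem?_getD] at h1
            simp [h1, h2']

-- a true pvStep forces its coordinates into the board
theorem pvStep_bounds {tablero : List (List String)} {v h : Int} {c : Char}
    (hs : pvStep tablero v h c = true) :
    0 ≤ v ∧ v < (tablero.length : Int) ∧ 0 ≤ h := by
  simp only [pvStep, Bool.and_eq_true, decide_eq_true_eq] at hs
  refine ⟨?_, ?_, ?_⟩ <;> tauto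

-- pvStep at in-board coordinates, in terms of the actual row
theorem pvStep_of_bounds (tablero : List (List String)) (v h : Int) (c : Char)
    (hv : 0 ≤ v) (hvl : v.toNat < tablero.length) (hh : 0 ≤ h) :
    (pvStep tablero v h c = true ↔
      h < (tablero[v.toNat].length : Int) ∧
        tablero[v.toNat].getD h.toNat "" = pvSingle c) := by
  simp only [pvStep, Bool.and_eq_true, decide_eq_true_eq, beq_iff_eq,
    List.getD_eq_getElem?_getD, List.getElem?_eq_getElem hvl, Option.getD_some]
  constructor
  · intro hs
    exact ⟨by tauto, by tauto⟩
  · intro hs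
    exact ⟨⟨hv, by omega⟩, ⟨hh, hs.1⟩, hs.2⟩



-- upward diagonal (orientacion = True): extraction over the sliced rows vs per-step checks
theorem extract_up (t : List (List String)) (cs : List Char) (posv posh : Int)
    (hv0 : 0 ≤ posv) (hvn : posv + (cs.length : Int) ≤ (t.length : Int)) (hh0 : 0 ≤ posh) :
    ((match altExtract posh (List.take cs.length (List.drop posv.toNat t)) 0 with
      | none => false
      | some d => d == cs.map pvSingle) = true) ↔
    ∀ i : Nat, (hi : i < cs.length) →
      pvStep t (posv + (i : Int)) (posh + (i : Int)) (cs[i]'hi) = true := by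
  have hlen : (List.take cs.length (List.drop posv.toNat t)).length = cs.length := by
    simp; omega
  rw [altExtract_iff]
  constructor
  · rintro ⟨-, hall⟩ i hi
    have hi' : i < (List.take cs.length (List.drop posv.toNat t)).length := by omega
    have hrow : (List.take cs.length (List.drop posv.toNat t))[i] =
        t[(posv + (i : Int)).toNat]'(by omega) := by
      rw [List.getElem_take, List.getElem_drop]
      congr 1
      omega
    have h := hall i hi' hi
    rw [hrow] at h
    rw [pvStep_of_bounds t _ _ _ (by omega) (by omega) (by omega)]
    refine ⟨?_, ?_⟩
    · have := h.1; push_cast at this ⊢; omega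
    · have h2 := h.2
      have hc : posh + ((0 + i : Nat) : Int) = posh + (i : Int) := by push_cast; ring
      rw [hc] at h2
      exact h2
  · intro hall
    refine ⟨hlen, ?_⟩
    intro j hj hj'
    have h := hall j hj'
    rw [pvStep_of_bounds t _ _ _ (by omega) (by omega) (by omega)] at h
    have hrow : (List.take cs.length (List.drop posv.toNat t))[j] =
        t[(posv + (j : Int)).toNat]'(by omega) := by
      rw [List.getElem_take, List.getElem_drop]
      congr 1
      omega
    rw [hrow]
    refine ⟨?_, ?_⟩
    · have := h.1; push_cast at this ⊢; omega
    · have h2 := h.2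
      have hc : posh + ((0 + j : Nat) : Int) = posh + (j : Int) := by push_cast; ring
      rw [hc]
      exact h2

-- downward diagonal (orientacion = False): reversed slice vs per-step checks
theorem extract_down (t : List (List String)) (cs : List Char) (posv posh : Int)
    (hv0 : 0 ≤ posv - (cs.length : Int) + 1) (hvn : posv < (t.length : Int)) (hh0 : 0 ≤ posh) :
    ((match altExtract posh
        ((List.take cs.length (List.drop (posv - (cs.length : Int) + 1).toNat t)).reverse) 0 with
      | none => false
      | some d => d == cs.map pvSingle) = true) ↔
    ∀ i : Nat, (hi : i < cs.length) →
      pvStep t (posv - (i : Int)) (posh + (i : Int)) (cs[i]'hi) = true := by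
  have hl2 : (List.take cs.length (List.drop (posv - (cs.length : Int) + 1).toNat t)).length =
      cs.length := by simp; omega
  have hlen : ((List.take cs.length
      (List.drop (posv - (cs.length : Int) + 1).toNat t)).reverse).length = cs.length := by
    simp; omega
  have hrowj : ∀ (j : Nat) (hj : j < cs.length),
      ((List.take cs.length (List.drop (posv - (cs.length : Int) + 1).toNat t)).reverse)[j]'(by omega) =
        t[(posv - (j : Int)).toNat]'(by omega) := by
    intro j hj
    rw [List.getElem_reverse, List.getElem_take, List.getElem_drop]
    congr 1
    rw [hl2]
    omega
  rw [altExtract_iff]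
  constructor
  · rintro ⟨-, hall⟩ i hi
    have h := hall i (by omega) hi
    rw [hrowj i hi] at h
    rw [pvStep_of_bounds t _ _ _ (by omega) (by omega) (by omega)]
    refine ⟨?_, ?_⟩
    · have := h.1; push_cast at this ⊢; omega
    · have h2 := h.2
      have hc : posh + ((0 + i : Nat) : Int) = posh + (i : Int) := by push_cast; ring
      rw [hc] at h2
      exact h2
  · intro hall
    refine ⟨hlen, ?_⟩
    intro j hj hj'
    have h := hall j hj'
    rw [pvStep_of_bounds t _ _ _ (by omega) (by omega) (by omega)] at h
    rw [hrowj j hj']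
    refine ⟨?_, ?_⟩
    · have := h.1; push_cast at this ⊢; omega
    · have h2 := h.2
      have hc : posh + ((0 + j : Nat) : Int) = posh + (j : Int) := by push_cast; ring
      rw [hc]
      exact h2

-- B is true iff every diagonal step is true
theorem alt_iff (tablero : List (List String)) (palabra : String) (posv posh : Int)
    (orientacion : Bool) :
    checkRepetidosd1_alt tablero palabra posv posh orientacion = true ↔
      ∀ i : Nat, (hi : i < palabra.toList.length) →
        pvStep tablero (posv + (if orientacion then (1 : Int) else -1) * i) (posh + i)
          palabra.toList[i] = true := by
  set cs := palabra.toList with hcs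
  by_cases hn : cs.length = 0
  · simp [checkRepetidosd1_alt, hn, ← hcs]
  · have hn1 : 1 ≤ cs.length := by omega
    by_cases ho : orientacion
    · -- upward diagonal: v = posv + i
      by_cases hb1 : posv < 0 ∨ (tablero.length : Int) < posv + (cs.length : Int)
      · -- out of the board: B rejects, and some step is false
        have hBfalse : checkRepetidosd1_alt tablero palabra posv posh orientacion = false := by
          simp [checkRepetidosd1_alt, ← hcs, hn, ho, hb1]
        rw [hBfalse]
        refine iff_of_false (by simp) ?_
        intro hall
        rcases hb1 with hb | hb
        · have := pvStep_bounds (hall 0 (by omega))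
          simp [ho] at this
          omega
        · have := pvStep_bounds (hall (cs.length - 1) (by omega))
          simp [ho] at this
          omega
      · push_neg at hb1
        obtain ⟨hv0, hvn⟩ := hb1
        by_cases hh0 : posh < 0
        · have hc1 : ¬(posv < 0 ∨ (tablero.length : Int) < posv + (cs.length : Int)) := by omega
          have hBfalse : checkRepetidosd1_alt tablero palabra posv posh orientacion = false := by
            simp [checkRepetidosd1_alt, ← hcs, hn, ho, hc1, hh0]
          rw [hBfalse]
          refine iff_of_false (by simp) ?_
          intro hall
          have := pvStep_bounds (hall 0 (by omega))
          simp [ho] at this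
          omega
        · push_neg at hh0
          have hc1 : ¬(posv < 0 ∨ (tablero.length : Int) < posv + (cs.length : Int)) := by omega
          have hB : checkRepetidosd1_alt tablero palabra posv posh orientacion =
              (match altExtract posh
                  (PySem.List.slice tablero (some posv) (some (posv + (cs.length : Int)))) 0 with
                | none => false
                | some diag => diag == cs.map pvSingle) := by
            simp [checkRepetidosd1_alt, ← hcs, hn, ho, hc1, hh0.not_gt]
          have hslice : PySem.List.slice tablero (some posv) (some (posv + (cs.length : Int))) =
              List.take cs.length (List.drop posv.toNat tablero) := by
            rw [PySem.List.slice_toNat tablero hv0 (by omega)]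
            congr 1
            omega
          rw [hB, hslice, extract_up tablero cs posv posh hv0 hvn hh0]
          refine forall_congr' fun i => forall_congr' fun hi => ?_
          simp [ho]
    · -- downward diagonal: v = posv - i
      by_cases hb1 : posv - (cs.length : Int) + 1 < 0 ∨ (tablero.length : Int) ≤ posv
      · have hBfalse : checkRepetidosd1_alt tablero palabra posv posh orientacion = false := by
          simp [checkRepetidosd1_alt, ← hcs, hn, ho, hb1]
        rw [hBfalse]
        refine iff_of_false (by simp) ?_
        intro hall
        rcases hb1 with hb | hb
        · have := pvStep_bounds (hall (cs.length - 1) (by omega))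
          simp [ho] at this
          omega
        · have := pvStep_bounds (hall 0 (by omega))
          simp [ho] at this
          omega
      · push_neg at hb1
        obtain ⟨hv0, hvn⟩ := hb1
        by_cases hh0 : posh < 0
        · have hc1 : ¬(posv - (cs.length : Int) + 1 < 0 ∨ (tablero.length : Int) ≤ posv) := by
            omega
          have hBfalse : checkRepetidosd1_alt tablero palabra posv posh orientacion = false := by
            simp [checkRepetidosd1_alt, ← hcs, hn, ho, hc1, hh0]
          rw [hBfalse]
          refine iff_of_false (by simp) ?_
          intro hall
          have := pvStep_bounds (hall 0 (by omega))
          simp [ho] at this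
          omega
        · push_neg at hh0
          have hc1 : ¬(posv - (cs.length : Int) + 1 < 0 ∨ (tablero.length : Int) ≤ posv) := by
            omega
          have hB : checkRepetidosd1_alt tablero palabra posv posh orientacion =
              (match altExtract posh
                  ((PySem.List.slice tablero (some (posv - (cs.length : Int) + 1))
                    (some (posv + 1))).reverse) 0 with
                | none => false
                | some diag => diag == cs.map pvSingle) := by
            simp [checkRepetidosd1_alt, ← hcs, hn, ho, hc1, hh0.not_gt]
          have hslice : PySem.List.slice tablero (some (posv - (cs.length : Int) + 1))
              (some (posv + 1)) =
              List.take cs.length (List.drop (posv - (cs.length : Int) + 1).toNat tablero) := by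
            rw [PySem.List.slice_toNat tablero (by omega) (by omega)]
            congr 1
            omega
          rw [hB, hslice, extract_down tablero cs posv posh hv0 hvn hh0]
          refine forall_congr' fun i => forall_congr' fun hi => ?_
          simp [ho, sub_eq_add_neg]

-- ===== VERDICT (by name: the statement is the Claim_ definition above) =====
theorem checkRepetidosd1_spec : Claim_equal_checkRepetidosd1 := by
  intro tablero palabra posv posh orientacion _
  unfold Spec_checkRepetidosd1 checkRepetidosd1
  exact Bool.coe_iff_coe.mp
    ((goA_iff tablero orientacion palabra.toList posv posh).trans
      (alt_iff tablero palabra posv posh orientacion).symm)
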